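-- pv_equiv track=rewrite | github.com/Chaclie/BaiduPaddleAI | Chapter3_MachineLearningBasic/Lab10_NaiveBayesClassifyingText/main.py | get_token_dict
-- ===== SOURCE A (Python) =====
-- def get_token_dict(token_list_list: list) -> dict:
--     """
--     根据传入的token_list_list统计各token的数目以及包含该token的token_list个数;
--     token_list_list嵌套的每个token_list表示一条新闻的token列表
--
--     Return: dict(token: [tot_count, token_list_count])
--     """
--     token_dict = {}
--     for token_list in token_list_list:
--         for token in token_list:
--             if token_dict.get(token) == None:
--                 token_dict[token] = [1, 0]
--             else:
--                 token_dict[token][0] += 1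
--         for token in set(token_list):
--             token_dict[token][1] += 1
--     return token_dict
-- ===== SOURCE B (Python) =====
-- def get_token_dict(token_list_list: list) -> dict:
--     token_dict = {}
--     for token_list in token_list_list:
--         # per-document frequency table: one pass over the raw tokens
--         counts = {}
--         for token in token_list:
--             counts[token] = counts.get(token, 0) + 1
--         # one pass over the DISTINCT tokens of this document
--         for token, cnt in counts.items():
--             old = token_dict.get(token)
--             if old is None:
--                 token_dict[token] = [cnt, 1]
--             else:
--                 token_dict[token] = [old[0] + cnt, old[1] + 1]
--     return token_dict
-- ===== Notes on version B (the rewrite author's own statement) =====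
-- stated objective: simpler
-- what changed: Per document B first builds a frequency table in one pass over the raw tokens, then merges it into the running dict in a single pass over the distinct tokens (adding the count and 1 to the doc-count at once), replacing A's two inner passes (per-occurrence increment with a get()==None check, then a second pass over set(token_list)).
import Mathlib
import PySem

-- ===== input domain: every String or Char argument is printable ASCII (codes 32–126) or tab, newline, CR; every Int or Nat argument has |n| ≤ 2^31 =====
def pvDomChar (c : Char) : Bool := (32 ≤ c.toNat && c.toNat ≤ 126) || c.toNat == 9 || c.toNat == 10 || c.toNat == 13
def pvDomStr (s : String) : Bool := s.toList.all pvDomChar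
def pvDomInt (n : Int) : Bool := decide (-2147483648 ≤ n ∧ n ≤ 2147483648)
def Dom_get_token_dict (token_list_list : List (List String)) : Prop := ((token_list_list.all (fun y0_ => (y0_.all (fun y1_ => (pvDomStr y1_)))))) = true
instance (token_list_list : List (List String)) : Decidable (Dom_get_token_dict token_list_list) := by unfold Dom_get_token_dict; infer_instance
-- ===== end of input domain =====

-- B replaces A's two inner passes per document (one over all tokens, one over set(token_list))
-- by a per-document frequency table and a single pass over its distinct tokens (objective: simpler).

-- ===== PORT A =====
-- token_dict[token][i] += 1  (in-place update of the two-element list)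
def pvA_inc (i : Int) (v : List Int) : List Int :=
  PySem.List.pySetD v i (PySem.List.pyGetD v i 0 + 1)

-- body of "for token in token_list: …"
def pvA_count (td : PySem.Dict String (List Int)) (t : String) : PySem.Dict String (List Int) :=
  if td.get? t = none then td.insert t [1, 0] else td.modify t [] (pvA_inc 0)

-- body of "for token in set(token_list): …" (commuting increments of distinct keys: the
-- result does not depend on Python's set iteration order)
def pvA_doc (td : PySem.Dict String (List Int)) (t : String) : PySem.Dict String (List Int) :=
  td.modify t [] (pvA_inc 1)

def get_token_dict (token_list_list : List (List String)) : List (String × List Int) :=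
  (token_list_list.foldl
    (fun td tl => (PySem.Set.ofList tl).foldl pvA_doc (tl.foldl pvA_count td))
    PySem.Dict.empty).items

-- ===== PORT B =====
-- counts[token] = counts.get(token, 0) + 1
def pvB_counts (tl : List String) : PySem.Dict String Int :=
  tl.foldl (fun c t => c.insert t (c.getD t 0 + 1)) PySem.Dict.empty

-- body of "for token, cnt in counts.items(): …"
def pvB_merge (td : PySem.Dict String (List Int)) (p : String × Int) : PySem.Dict String (List Int) :=
  match td.get? p.1 with
  | none => td.insert p.1 [p.2, 1]
  | some old => td.insert p.1 [PySem.List.pyGetD old 0 0 + p.2, PySem.List.pyGetD old 1 0 + 1]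

def get_token_dict_alt (token_list_list : List (List String)) : List (String × List Int) :=
  (token_list_list.foldl (fun td tl => (pvB_counts tl).items.foldl pvB_merge td)
    PySem.Dict.empty).items

-- ===== PRECONDITION & SPEC =====
def Spec_get_token_dict (token_list_list : List (List String)) (out : List (String × List Int)) : Prop := out = get_token_dict_alt token_list_list
instance (token_list_list : List (List String)) (out : List (String × List Int)) : Decidable (Spec_get_token_dict token_list_list out) := by unfold Spec_get_token_dict; infer_instance

-- ===== CLAIM (what is proved, stated in full; the proofs are below) =====
def Claim_equal_get_token_dict : Prop := ∀ (token_list_list : List (List String)), Dom_get_token_dict token_list_list → Spec_get_token_dict token_list_list (get_token_dict token_list_list)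

-- ===== LEMMAS AND PROOFS =====

-- the invariant carried across documents: keys are distinct and every stored value is a pair [a, b]
def pvInv (d : PySem.Dict String (List Int)) : Prop :=
  d.keys.Nodup ∧ ∀ k, d.contains k = true → ∃ a b : Int, d.getD k [] = [a, b]

theorem pvInc0 (a b : Int) : pvA_inc 0 [a, b] = [a + 1, b] := by
  simp [pvA_inc, PySem.List.pySetD, PySem.List.pySet?, PySem.List.pyGetD, PySem.List.pyGet?,
    PySem.List.pyIdx?]

theorem pvInc1 (a b : Int) : pvA_inc 1 [a, b] = [a, b + 1] := by
  simp [pvA_inc, PySem.List.pySetD, PySem.List.pySet?, PySem.List.pyGetD, PySem.List.pyGet?,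
    PySem.List.pyIdx?]

theorem pvGet?_of_contains (d : PySem.Dict String (List Int)) (k : String)
    (h : d.contains k = true) : d.get? k = some (d.getD k []) := by
  cases hg : d.get? k with
  | none => rw [PySem.Dict.contains_eq_isSome_get?, hg] at h; simp at h
  | some v => rw [PySem.Dict.getD_of_get?_eq_some d [] hg]

theorem pvGet?_none (d : PySem.Dict String (List Int)) (k : String)
    (h : d.contains k = false) : d.get? k = none := by
  cases hg : d.get? k with
  | none => rfl
  | some v => rw [PySem.Dict.contains_eq_isSome_get?, hg] at h; simp at h

theorem pvGet?_modify (d : PySem.Dict String (List Int)) (t k : String) (f : List Int → List Int) :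
    (d.modify t [] f).get? k = if k = t then some (f (d.getD t [])) else d.get? k := by
  by_cases hk : k = t
  · subst hk
    have hc : (d.modify k [] f).contains k = true := by
      rw [PySem.Dict.contains_modify]; simp
    rw [pvGet?_of_contains _ _ hc, PySem.Dict.getD_modify]
    simp
  · have hc : (d.modify t [] f).contains k = d.contains k := by
      rw [PySem.Dict.contains_modify]
      have : (k == t) = false := by simp [hk]
      rw [this]; simp
    cases hck : d.contains k with
    | false => rw [pvGet?_none _ _ (hc.trans hck), pvGet?_none _ _ hck]; simp [hk]
    | true =>
        rw [pvGet?_of_contains _ _ (hc.trans hck), pvGet?_of_contains _ _ hck,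
          PySem.Dict.getD_modify]
        simp [hk]

theorem pvKeys_insert (d : PySem.Dict String (List Int)) (k : String) (v : List Int) :
    (d.insert k v).keys = PySem.Set.add d.keys k := by
  cases hc : d.contains k with
  | true =>
      have hk : k ∈ d.keys := by
        rw [PySem.Dict.contains_eq_decide_mem_keys] at hc; simpa using hc
      rw [PySem.Set.add_of_mem hk]
      have := PySem.Dict.items_insert_of_contains d v hc
      show (d.insert k v).items.map Prod.fst = d.items.map Prod.fst
      rw [this, List.map_map]
      apply List.map_congr_left
      intro p _
      by_cases hp : p.1 = k <;> simp [hp]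
  | false =>
      have hk : k ∉ d.keys := by
        rw [PySem.Dict.contains_eq_decide_mem_keys] at hc; simpa using hc
      rw [PySem.Set.add_of_not_mem hk]
      have := PySem.Dict.items_insert_of_not_contains d v hc
      show (d.insert k v).items.map Prod.fst = d.items.map Prod.fst ++ [k]
      rw [this]; simp

theorem pvKeys_modify (d : PySem.Dict String (List Int)) (t : String) (f : List Int → List Int) :
    (d.modify t [] f).keys = PySem.Set.add d.keys t := by
  rw [PySem.Dict.keys_modify, pvKeys_insert]

theorem pvKeys_count (d : PySem.Dict String (List Int)) (t : String) :
    (pvA_count d t).keys = PySem.Set.add d.keys t := by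
  unfold pvA_count
  split
  · exact pvKeys_insert d t [1, 0]
  · exact pvKeys_modify d t (pvA_inc 0)

theorem pvKeys_merge (d : PySem.Dict String (List Int)) (p : String × Int) :
    (pvB_merge d p).keys = PySem.Set.add d.keys p.1 := by
  unfold pvB_merge
  cases d.get? p.1 <;> exact pvKeys_insert d p.1 _

theorem pvFoldl_keys (g : PySem.Dict String (List Int) → String → PySem.Dict String (List Int))
    (hg : ∀ d t, (g d t).keys = PySem.Set.add d.keys t) :
    ∀ (l : List String) (d : PySem.Dict String (List Int)),
      (l.foldl g d).keys = PySem.Set.update d.keys l := by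
  intro l
  induction l with
  | nil => intro d; rfl
  | cons t l ih =>
      intro d
      show ((l.foldl g (g d t)).keys) = PySem.Set.update (PySem.Set.add d.keys t) l
      rw [ih, hg]

theorem pvUpdate_eq_foldl (s : PySem.Set String) (l : List String) :
    PySem.Set.update s l = l.foldl PySem.Set.add s := rfl

theorem pvUpdate_append (s : PySem.Set String) (l : List String) (x : String) :
    PySem.Set.update s (l ++ [x]) = PySem.Set.add (PySem.Set.update s l) x := by
  rw [pvUpdate_eq_foldl, List.foldl_append, ← pvUpdate_eq_foldl]; rfl

theorem pvOfList_append (l : List String) (x : String) :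
    PySem.Set.ofList (l ++ [x]) = PySem.Set.add (PySem.Set.ofList l) x := by
  rw [PySem.Set.ofList_eq_foldl, List.foldl_append, ← PySem.Set.ofList_eq_foldl]; rfl

theorem pvUpdate_noop (l : List String) : ∀ (s : PySem.Set String),
    (∀ x ∈ l, x ∈ s) → PySem.Set.update s l = s := by
  induction l with
  | nil => intro s _; rfl
  | cons x l ih =>
      intro s h
      show PySem.Set.update (s.add x) l = s
      rw [PySem.Set.add_of_mem (h x (by simp))]
      exact ih s (fun y hy => h y (by simp [hy]))

theorem pvUpdate_ofList (s : PySem.Set String) (l : List String) :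
    PySem.Set.update s (PySem.Set.ofList l) = PySem.Set.update s l := by
  induction l using List.reverseRecOn with
  | nil => rfl
  | append_singleton l x ih =>
      rw [pvOfList_append, pvUpdate_append]
      by_cases hx : x ∈ PySem.Set.ofList l
      · rw [PySem.Set.add_of_mem hx, ih,
          PySem.Set.add_of_mem ((PySem.Set.mem_update _ _ _).mpr
            (Or.inr ((PySem.Set.mem_ofList l x).mp hx)))]
      · rw [PySem.Set.add_of_not_mem hx, pvUpdate_append, ih]

theorem pvUpdate_idem (s : PySem.Set String) (l : List String) :
    PySem.Set.update (PySem.Set.update s l) l = PySem.Set.update s l :=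
  pvUpdate_noop l _ (fun _ hx => (PySem.Set.mem_update _ _ _).mpr (Or.inr hx))

-- phase 1 of A (the raw-token loop): per-key effect
theorem pvA1_getD : ∀ (tl : List String) (d : PySem.Dict String (List Int)), d.keys.Nodup →
    (∀ k a b, d.get? k = some [a, b] →
      (tl.foldl pvA_count d).getD k [] = [a + (List.count k tl : Int), b]) ∧
    (∀ k, d.get? k = none →
      (tl.foldl pvA_count d).getD k [] =
        (if k ∈ tl then [((List.count k tl : Nat) : Int), 0] else [])) := by
  intro tl
  induction tl with
  | nil =>
      intro d _
      constructor
      · intro k a b hk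
        simp [PySem.Dict.getD_of_get?_eq_some d [] hk]
      · intro k hk
        simp [PySem.Dict.getD_eq_get?_getD, hk]
  | cons t tl ih =>
      intro d hnd
      have hnd' : (pvA_count d t).keys.Nodup := by
        rw [pvKeys_count]
        exact PySem.Set.nodup_update d.keys [t] hnd
      obtain ⟨IHs, IHn⟩ := ih (pvA_count d t) hnd'
      have hstep : ∀ k, (pvA_count d t).get? k =
          if k = t then
            (match d.get? t with
             | none => some [1, 0]
             | some _ => some (pvA_inc 0 (d.getD t [])))
          else d.get? k := by
        intro k
        unfold pvA_count
        cases hgt : d.get? t with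
        | none =>
            rw [if_pos rfl, PySem.Dict.get?_insert]
        | some v =>
            rw [if_neg (by simp), pvGet?_modify]
      constructor
      · intro k a b hk
        show (tl.foldl pvA_count (pvA_count d t)).getD k [] = _
        by_cases hkt : k = t
        · subst hkt
          cases hgt : d.get? k with
          | none => rw [hgt] at hk; exact absurd hk (by simp)
          | some v =>
              have hv : v = [a, b] := by rw [hgt] at hk; exact Option.some.inj hk
              have hgd : d.getD k [] = [a, b] := by
                rw [PySem.Dict.getD_of_get?_eq_some d [] hgt, hv]
              have : (pvA_count d k).get? k = some [a + 1, b] := by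
                rw [hstep k, if_pos rfl, hgt, hgd, pvInc0]
              rw [IHs k (a + 1) b this]
              rw [List.count_cons_self]
              push_cast
              ring_nf
        · have : (pvA_count d t).get? k = some [a, b] := by
            rw [hstep k, if_neg hkt]; exact hk
          rw [IHs k a b this, List.count_cons_of_ne (fun h => hkt h.symm)]
      · intro k hk
        show (tl.foldl pvA_count (pvA_count d t)).getD k [] = _
        by_cases hkt : k = t
        · subst hkt
          have : (pvA_count d k).get? k = some [1, 0] := by
            rw [hstep k, if_pos rfl, hk]
          rw [IHs k 1 0 this]
          rw [if_pos (by simp), List.count_cons_self]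
          push_cast
          ring_nf
        · have : (pvA_count d t).get? k = none := by
            rw [hstep k, if_neg hkt]; exact hk
          rw [IHn k this, List.count_cons_of_ne (fun h => hkt h.symm)]
          simp [hkt]

-- phase 2 of A (the set loop): per-key effect, over a duplicate-free list
theorem pvA2_getD : ∀ (s : List String), s.Nodup →
    ∀ (d : PySem.Dict String (List Int)) (k : String),
      (s.foldl pvA_doc d).getD k [] =
        if k ∈ s then pvA_inc 1 (d.getD k []) else d.getD k [] := by
  intro s
  induction s with
  | nil => intro _ d k; simp
  | cons t s ih =>
      intro hnd d k
      have hts : t ∉ s := (List.nodup_cons.mp hnd).1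
      have hs : s.Nodup := (List.nodup_cons.mp hnd).2
      show (s.foldl pvA_doc (pvA_doc d t)).getD k [] = _
      rw [ih hs]
      have hm : (pvA_doc d t).getD k [] = if k = t then pvA_inc 1 (d.getD t []) else d.getD k [] :=
        PySem.Dict.getD_modify d t k [] (pvA_inc 1)
      by_cases hkt : k = t
      · subst hkt
        rw [if_neg hts, hm, if_pos rfl, if_pos (by simp)]
      · rw [hm, if_neg hkt]
        by_cases hks : k ∈ s <;> simp [hks, hkt]

-- B's merge loop over a duplicate-free list of tokens, each carrying its document count
theorem pvB_getD (tl : List String) : ∀ (s : List String), s.Nodup →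
    ∀ (d : PySem.Dict String (List Int)) (k : String),
      (s.foldl (fun td t => pvB_merge td (t, (List.count t tl : Int))) d).getD k [] =
        if k ∈ s then
          (match d.get? k with
           | none => [((List.count k tl : Nat) : Int), 1]
           | some old => [PySem.List.pyGetD old 0 0 + (List.count k tl : Int),
                          PySem.List.pyGetD old 1 0 + 1])
        else d.getD k [] := by
  intro s
  induction s with
  | nil => intro _ d k; simp
  | cons t s ih =>
      intro hnd d k
      have hts : t ∉ s := (List.nodup_cons.mp hnd).1
      have hs : s.Nodup := (List.nodup_cons.mp hnd).2
      show (s.foldl _ (pvB_merge d (t, (List.count t tl : Int)))).getD k [] = _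
      rw [ih hs]
      have hget : ∀ k', (pvB_merge d (t, (List.count t tl : Int))).get? k' =
          if k' = t then
            (match d.get? t with
             | none => some [((List.count t tl : Nat) : Int), 1]
             | some old => some [PySem.List.pyGetD old 0 0 + (List.count t tl : Int),
                                 PySem.List.pyGetD old 1 0 + 1])
          else d.get? k' := by
        intro k'
        unfold pvB_merge
        cases hgt : d.get? t <;> rw [PySem.Dict.get?_insert]
      by_cases hkt : k = t
      · subst hkt
        rw [if_neg hts, if_pos (by simp)]
        have h1 : (pvB_merge d (k, (List.count k tl : Int))).getD k [] =
            ((pvB_merge d (k, (List.count k tl : Int))).get? k).getD [] :=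
          PySem.Dict.getD_eq_get?_getD _ k []
        rw [h1, hget k, if_pos rfl]
        cases d.get? k <;> simp
      · by_cases hks : k ∈ s
        · rw [if_pos hks, if_pos (show k ∈ t :: s by simp [hks])]
          have h2 : (pvB_merge d (t, (List.count t tl : Int))).get? k = d.get? k := by
            rw [hget k, if_neg hkt]
          rw [h2]
        · rw [if_neg hks, if_neg (show ¬ k ∈ t :: s by simp [hkt, hks])]
          rw [PySem.Dict.getD_eq_get?_getD _ k [], hget k, if_neg hkt,
            ← PySem.Dict.getD_eq_get?_getD]

-- B's per-document step rewritten as a fold over the distinct tokens of the document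
theorem pvB_step_eq (tl : List String) (d : PySem.Dict String (List Int)) :
    (pvB_counts tl).items.foldl pvB_merge d =
      (PySem.Set.ofList tl).foldl (fun td t => pvB_merge td (t, (List.count t tl : Int))) d := by
  have h : pvB_counts tl = PySem.Dict.counter tl :=
    PySem.Dict.foldl_insert_getD_add_one_eq_counter tl
  rw [h, PySem.Dict.items_counter, List.foldl_map]

theorem pvStepA_keys (d : PySem.Dict String (List Int)) (tl : List String) :
    ((PySem.Set.ofList tl).foldl pvA_doc (tl.foldl pvA_count d)).keys =
      PySem.Set.update d.keys tl := by
  rw [pvFoldl_keys pvA_doc (fun d t => pvKeys_modify d t (pvA_inc 1)),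
    pvFoldl_keys pvA_count pvKeys_count,
    pvUpdate_ofList, pvUpdate_idem]

theorem pvStepB_keys (d : PySem.Dict String (List Int)) (tl : List String) :
    ((pvB_counts tl).items.foldl pvB_merge d).keys = PySem.Set.update d.keys tl := by
  rw [pvB_step_eq,
    pvFoldl_keys (fun td t => pvB_merge td (t, (List.count t tl : Int)))
      (fun d t => pvKeys_merge d (t, (List.count t tl : Int))),
    pvUpdate_ofList]

-- A's per-document step, per key, equals B's characterisation
theorem pvStepA_getD (tl : List String) (d : PySem.Dict String (List Int))
    (hnd : d.keys.Nodup)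
    (hsh : ∀ k, d.contains k = true → ∃ a b : Int, d.getD k [] = [a, b]) (k : String) :
    ((PySem.Set.ofList tl).foldl pvA_doc (tl.foldl pvA_count d)).getD k [] =
      if k ∈ tl then
        (match d.get? k with
         | none => [((List.count k tl : Nat) : Int), 1]
         | some old => [PySem.List.pyGetD old 0 0 + (List.count k tl : Int),
                        PySem.List.pyGetD old 1 0 + 1])
      else d.getD k [] := by
  rw [pvA2_getD (PySem.Set.ofList tl) (PySem.Set.nodup_ofList tl)]
  obtain ⟨IHs, IHn⟩ := pvA1_getD tl d hnd
  have hmem : (k ∈ PySem.Set.ofList tl) ↔ (k ∈ tl) := PySem.Set.mem_ofList tl k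
  cases hc : d.contains k with
  | false =>
      have hg : d.get? k = none := pvGet?_none d k hc
      rw [IHn k hg, hg]
      by_cases hk : k ∈ tl
      · rw [if_pos (hmem.mpr hk), if_pos hk, if_pos hk, pvInc1]
        simp
      · rw [if_neg (fun h => hk (hmem.mp h)), if_neg hk, if_neg hk,
          PySem.Dict.getD_of_not_contains d [] hc]
  | true =>
      obtain ⟨a, b, hab⟩ := hsh k hc
      have hg : d.get? k = some [a, b] := by rw [pvGet?_of_contains d k hc, hab]
      rw [IHs k a b hg, hg]
      by_cases hk : k ∈ tl
      · rw [if_pos (hmem.mpr hk), if_pos hk, pvInc1]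
        simp [PySem.List.pyGetD, PySem.List.pyGet?, PySem.List.pyIdx?]
      · rw [if_neg (fun h => hk (hmem.mp h)), if_neg hk, hab]
        have : List.count k tl = 0 := List.count_eq_zero.mpr hk
        rw [this]
        simp

theorem pvInv_empty : pvInv PySem.Dict.empty := by
  constructor
  · simp [PySem.Dict.keys_empty]
  · intro k hk
    rw [PySem.Dict.contains_empty] at hk
    exact absurd hk (by simp)

theorem pvInv_stepA (d : PySem.Dict String (List Int)) (tl : List String) (h : pvInv d) :
    pvInv ((PySem.Set.ofList tl).foldl pvA_doc (tl.foldl pvA_count d)) := by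
  constructor
  · rw [pvStepA_keys]
    exact PySem.Set.nodup_update d.keys tl h.1
  · intro k _
    rw [pvStepA_getD tl d h.1 h.2 k]
    by_cases hk : k ∈ tl
    · rw [if_pos hk]
      cases hg : d.get? k with
      | none => exact ⟨_, _, rfl⟩
      | some old => exact ⟨_, _, rfl⟩
    · rw [if_neg hk]
      cases hc : d.contains k with
      | true => exact h.2 k hc
      | false =>
          rw [PySem.Dict.getD_of_not_contains d [] hc]
          -- absent key, untouched by this document: value is the default []; but then
          -- contains of the result at k must be false, contradiction is not needed:
          -- we only must exhibit the pair when the value is consulted; here the key is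
          -- absent from the result too, so derive a contradiction from membership.
          exfalso
          rename_i hcres
          rw [PySem.Dict.contains_eq_decide_mem_keys, pvStepA_keys] at hcres
          have : k ∈ PySem.Set.update d.keys tl := by simpa using hcres
          rcases (PySem.Set.mem_update d.keys tl k).mp this with hmem | hmem
          · rw [PySem.Dict.contains_eq_decide_mem_keys] at hc
            simp [hmem] at hc
          · exact hk hmem

theorem pvStep_eq (tl : List String) (d : PySem.Dict String (List Int)) (h : pvInv d) :
    (PySem.Set.ofList tl).foldl pvA_doc (tl.foldl pvA_count d) =
      (pvB_counts tl).items.foldl pvB_merge d := by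
  apply PySem.Dict.ext
  have hndA : ((PySem.Set.ofList tl).foldl pvA_doc (tl.foldl pvA_count d)).keys.Nodup := by
    rw [pvStepA_keys]; exact PySem.Set.nodup_update d.keys tl h.1
  have hndB : ((pvB_counts tl).items.foldl pvB_merge d).keys.Nodup := by
    rw [pvStepB_keys]; exact PySem.Set.nodup_update d.keys tl h.1
  rw [PySem.Dict.items_eq_map_keys _ hndA [], PySem.Dict.items_eq_map_keys _ hndB [],
    pvStepA_keys, pvStepB_keys]
  apply List.map_congr_left
  intro k _
  rw [pvStepA_getD tl d h.1 h.2 k, pvB_step_eq,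
    pvB_getD tl (PySem.Set.ofList tl) (PySem.Set.nodup_ofList tl) d k]
  by_cases hk : k ∈ tl
  · rw [if_pos hk, if_pos ((PySem.Set.mem_ofList tl k).mpr hk)]
  · rw [if_neg hk, if_neg (fun hmem => hk ((PySem.Set.mem_ofList tl k).mp hmem))]

theorem pvFold_eq : ∀ (tll : List (List String)) (d : PySem.Dict String (List Int)), pvInv d →
    tll.foldl (fun td tl => (PySem.Set.ofList tl).foldl pvA_doc (tl.foldl pvA_count td)) d =
      tll.foldl (fun td tl => (pvB_counts tl).items.foldl pvB_merge td) d := by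
  intro tll
  induction tll with
  | nil => intro d _; rfl
  | cons tl tll ih =>
      intro d h
      show tll.foldl _ ((PySem.Set.ofList tl).foldl pvA_doc (tl.foldl pvA_count d)) =
        tll.foldl _ ((pvB_counts tl).items.foldl pvB_merge d)
      rw [← pvStep_eq tl d h]
      exact ih _ (pvInv_stepA d tl h)

-- ===== VERDICT (by name: the statement is the Claim_ definition above) =====
theorem get_token_dict_spec : Claim_equal_get_token_dict := by
  intro tll _
  unfold Spec_get_token_dict get_token_dict get_token_dict_alt
  rw [pvFold_eq tll PySem.Dict.empty pvInv_empty]
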